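-- pv_equiv track=rewrite | github.com/blacksoxx/vmware-migration-agent | providers/openstack/sizing_table.py | get_instance_type
-- ===== SOURCE A (Python) =====
-- from bisect import bisect_left
--
-- _OPENSTACK_SIZING_TABLE: dict[int, list[tuple[int, str]]] = {
--     1: [
--         (1024, "m1.tiny"),
--         (2048, "m1.small"),
--     ],
--     2: [
--         (4096, "m1.small"),
--         (8192, "m1.medium"),
--         (16384, "m1.large"),
--     ],
--     4: [
--         (8192, "m1.medium"),
--         (16384, "m1.large"),
--         (32768, "m1.xlarge"),
--     ],
--     8: [
--         (16384, "m1.large"),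
--         (32768, "m1.xlarge"),
--         (65536, "m1.2xlarge"),
--     ],
--     16: [
--         (32768, "m1.xlarge"),
--         (65536, "m1.2xlarge"),
--         (131072, "m1.4xlarge"),
--     ],
-- }
--
-- def get_instance_type(vcpus: int, ram_mb: int) -> str:
--     """Return OpenStack flavor using exact-vCPU and closest-ceiling RAM lookup."""
--     if vcpus <= 0:
--         raise ValueError("vcpus must be > 0")
--     if ram_mb <= 0:
--         raise ValueError("ram_mb must be > 0")
--
--     selected_vcpus = _select_vcpu_bucket(vcpus)
--     options = _OPENSTACK_SIZING_TABLE[selected_vcpus]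
--
--     ram_values = [entry[0] for entry in options]
--     index = bisect_left(ram_values, ram_mb)
--
--     if index < len(options):
--         return options[index][1]
--
--     return options[-1][1]
--
-- def _select_vcpu_bucket(requested_vcpus: int) -> int:
--     if requested_vcpus in _OPENSTACK_SIZING_TABLE:
--         return requested_vcpus
--
--     available = sorted(_OPENSTACK_SIZING_TABLE)
--     for candidate in available:
--         if candidate >= requested_vcpus:
--             return candidate
--
--     return available[-1]
-- ===== SOURCE B (Python) =====
-- def get_instance_type(vcpus: int, ram_mb: int) -> str:
--     """Return OpenStack flavor using exact-vCPU and closest-ceiling RAM lookup."""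
--     if vcpus <= 0:
--         raise ValueError("vcpus must be > 0")
--     if ram_mb <= 0:
--         raise ValueError("ram_mb must be > 0")
--
--     if vcpus <= 1:
--         table = [(1024, "m1.tiny"), (2048, "m1.small")]
--     elif vcpus <= 2:
--         table = [(4096, "m1.small"), (8192, "m1.medium"), (16384, "m1.large")]
--     elif vcpus <= 4:
--         table = [(8192, "m1.medium"), (16384, "m1.large"), (32768, "m1.xlarge")]
--     elif vcpus <= 8:
--         table = [(16384, "m1.large"), (32768, "m1.xlarge"), (65536, "m1.2xlarge")]
--     else:
--         table = [(32768, "m1.xlarge"), (65536, "m1.2xlarge"), (131072, "m1.4xlarge")]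
--
--     for ceiling, flavor in table:
--         if ram_mb <= ceiling:
--             return flavor
--     return table[-1][1]
-- ===== Notes on version B (the rewrite author's own statement) =====
-- stated objective: simpler
-- what changed: Replaces the dict + sorted-keys bucket search and the bisect-based RAM lookup with a threshold if/elif chain selecting the bucket and a single linear scan returning the first flavor whose RAM ceiling is >= ram_mb (last flavor if none).
import Mathlib
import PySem

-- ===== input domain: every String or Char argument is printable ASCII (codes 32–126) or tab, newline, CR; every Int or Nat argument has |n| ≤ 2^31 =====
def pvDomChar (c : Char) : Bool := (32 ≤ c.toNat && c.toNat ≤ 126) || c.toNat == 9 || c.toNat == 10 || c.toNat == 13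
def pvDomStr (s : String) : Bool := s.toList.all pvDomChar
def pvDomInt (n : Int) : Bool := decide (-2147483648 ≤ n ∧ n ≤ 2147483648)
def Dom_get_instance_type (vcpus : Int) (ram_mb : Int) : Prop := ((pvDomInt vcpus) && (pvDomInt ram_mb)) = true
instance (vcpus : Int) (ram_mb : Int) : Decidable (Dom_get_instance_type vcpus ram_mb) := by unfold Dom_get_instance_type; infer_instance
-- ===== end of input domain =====

-- B replaces the dict/sorted/bisect machinery with a threshold chain and a linear
-- first-ceiling scan; objective: simpler. A raises ValueError on vcpus ≤ 0 or
-- ram_mb ≤ 0 (excluded by Pre_); the ports return "" on those raise branches.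

-- ===== PORT A =====
-- the module-level dict, as an insertion-ordered association list
def pvTable : PySem.Dict Int (List (Int × String)) :=
  PySem.Dict.ofList
  [(1, [(1024, "m1.tiny"), (2048, "m1.small")]),
   (2, [(4096, "m1.small"), (8192, "m1.medium"), (16384, "m1.large")]),
   (4, [(8192, "m1.medium"), (16384, "m1.large"), (32768, "m1.xlarge")]),
   (8, [(16384, "m1.large"), (32768, "m1.xlarge"), (65536, "m1.2xlarge")]),
   (16, [(32768, "m1.xlarge"), (65536, "m1.2xlarge"), (131072, "m1.4xlarge")])]

-- helper _select_vcpu_bucket, step for step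
def pvSelectVcpuBucket (requested_vcpus : Int) : Int :=
  if (PySem.Dict.get? pvTable requested_vcpus).isSome then requested_vcpus
  else
    let available := PySem.List.sorted (PySem.Dict.keys pvTable) (fun x => x)
    match available.find? (fun c => decide (requested_vcpus ≤ c)) with
    | some c => c
    | none => ((PySem.List.pyGet? available (-1)).getD 0)

def get_instance_type (vcpus : Int) (ram_mb : Int) : String :=
  if vcpus ≤ 0 then ""          -- raise ValueError (outside Pre_)
  else if ram_mb ≤ 0 then ""    -- raise ValueError (outside Pre_)
  else
    let selected_vcpus := pvSelectVcpuBucket vcpus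
    let options := (PySem.Dict.get? pvTable selected_vcpus).getD []
    let ram_values := options.map (·.1)
    let index := PySem.List.bisectLeft ram_values ram_mb
    if index < options.length then ((options.getD index (0, "")).2)
    else ((PySem.List.pyGet? options (-1)).getD (0, "")).2

-- ===== PORT B =====
def get_instance_type_alt (vcpus : Int) (ram_mb : Int) : String :=
  if vcpus ≤ 0 then ""          -- raise ValueError (outside Pre_)
  else if ram_mb ≤ 0 then ""    -- raise ValueError (outside Pre_)
  else
    let table : List (Int × String) :=
      if vcpus ≤ 1 then [(1024, "m1.tiny"), (2048, "m1.small")]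
      else if vcpus ≤ 2 then [(4096, "m1.small"), (8192, "m1.medium"), (16384, "m1.large")]
      else if vcpus ≤ 4 then [(8192, "m1.medium"), (16384, "m1.large"), (32768, "m1.xlarge")]
      else if vcpus ≤ 8 then [(16384, "m1.large"), (32768, "m1.xlarge"), (65536, "m1.2xlarge")]
      else [(32768, "m1.xlarge"), (65536, "m1.2xlarge"), (131072, "m1.4xlarge")]
    match table.find? (fun p => decide (ram_mb ≤ p.1)) with
    | some p => p.2
    | none => ((PySem.List.pyGet? table (-1)).getD (0, "")).2

-- ===== PRECONDITION & SPEC =====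
-- A raises ValueError exactly when vcpus ≤ 0 or ram_mb ≤ 0
def Pre_get_instance_type (vcpus : Int) (ram_mb : Int) : Prop := 0 < vcpus ∧ 0 < ram_mb
instance (vcpus : Int) (ram_mb : Int) : Decidable (Pre_get_instance_type vcpus ram_mb) := by unfold Pre_get_instance_type; infer_instance
def pvWitness_get_instance_type : Int × Int := (3, 5000)

def Spec_get_instance_type (vcpus : Int) (ram_mb : Int) (out : String) : Prop := out = get_instance_type_alt vcpus ram_mb
instance (vcpus : Int) (ram_mb : Int) (out : String) : Decidable (Spec_get_instance_type vcpus ram_mb out) := by unfold Spec_get_instance_type; infer_instance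

-- ===== CLAIM (what is proved, stated in full; the proofs are below) =====
def Claim_equal_get_instance_type : Prop := ∀ (vcpus : Int) (ram_mb : Int), Dom_get_instance_type vcpus ram_mb → Pre_get_instance_type vcpus ram_mb → Spec_get_instance_type vcpus ram_mb (get_instance_type vcpus ram_mb)

-- ===== LEMMAS AND PROOFS =====

-- A's bucket selection equals B's threshold chain, for positive vcpus
theorem pvBucket_eq (vcpus : Int) (hv : 0 < vcpus) : pvSelectVcpuBucket vcpus =
    if vcpus ≤ 1 then 1 else if vcpus ≤ 2 then 2 else if vcpus ≤ 4 then 4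
    else if vcpus ≤ 8 then 8 else 16 := by
  unfold pvSelectVcpuBucket
  by_cases h1 : vcpus = 1
  · subst h1; decide
  by_cases h2 : vcpus = 2
  · subst h2; decide
  by_cases h4 : vcpus = 4
  · subst h4; decide
  by_cases h8 : vcpus = 8
  · subst h8; decide
  by_cases h16 : vcpus = 16
  · subst h16; decide
  have hmiss : (PySem.Dict.get? pvTable vcpus).isSome = false := by
    have : pvTable = PySem.Dict.mk
        [(1, [(1024, "m1.tiny"), (2048, "m1.small")]),
         (2, [(4096, "m1.small"), (8192, "m1.medium"), (16384, "m1.large")]),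
         (4, [(8192, "m1.medium"), (16384, "m1.large"), (32768, "m1.xlarge")]),
         (8, [(16384, "m1.large"), (32768, "m1.xlarge"), (65536, "m1.2xlarge")]),
         (16, [(32768, "m1.xlarge"), (65536, "m1.2xlarge"), (131072, "m1.4xlarge")])] := by decide
    simp [this, PySem.Dict.get?_mk_cons, h1, h2, h4, h8, h16,
      (by omega : vcpus ≠ 1), (by omega : vcpus ≠ 2)]
    simp [PySem.Dict.get?, Ne.symm h1, Ne.symm h2, Ne.symm h4, Ne.symm h8, Ne.symm h16]
  rw [hmiss]
  simp only [Bool.false_eq_true, if_false]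
  rw [show PySem.List.sorted (PySem.Dict.keys pvTable) (fun x => x) = [1, 2, 4, 8, 16] by decide]
  by_cases c1 : vcpus ≤ 1 <;> by_cases c2 : vcpus ≤ 2 <;> by_cases c4 : vcpus ≤ 4 <;>
    by_cases c8 : vcpus ≤ 8 <;> by_cases c16 : vcpus ≤ 16 <;>
    simp [List.find?, PySem.List.pyGet?, PySem.List.pyIdx?, c1, c2, c4, c8, c16] <;> omega

-- ===== VERDICT (by name: the statement is the Claim_ definition above) =====
theorem get_instance_type_spec : Claim_equal_get_instance_type := by
  intro vcpus ram_mb _ hpre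
  obtain ⟨hv, hr⟩ := hpre
  unfold Spec_get_instance_type get_instance_type get_instance_type_alt
  simp only [show ¬ vcpus ≤ 0 by omega, show ¬ ram_mb ≤ 0 by omega, if_false]
  rw [pvBucket_eq vcpus hv]
  by_cases c1 : vcpus ≤ 1
  · simp only [c1, if_true]
    rw [show (PySem.Dict.get? pvTable 1).getD [] = [(1024, "m1.tiny"), (2048, "m1.small")] by decide]
    rcases le_or_gt ram_mb 1024 with h1 | h1
    · simp [PySem.List.bisectLeft, PySem.List.bisectLeftLoop, List.find?, h1,
        show ¬(1024:Int) < ram_mb by omega, show ¬(2048:Int) < ram_mb by omega]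
    rcases le_or_gt ram_mb 2048 with h2 | h2
    · simp [PySem.List.bisectLeft, PySem.List.bisectLeftLoop, List.find?, h2,
        show (1024:Int) < ram_mb by omega,
        show ¬(2048:Int) < ram_mb by omega, show ¬ ram_mb ≤ 1024 by omega]
    · simp [PySem.List.bisectLeft, PySem.List.bisectLeftLoop, List.find?, PySem.List.pyGet?,
        PySem.List.pyIdx?, show (1024:Int) < ram_mb by omega, show (2048:Int) < ram_mb by omega,
        show ¬ ram_mb ≤ 1024 by omega, show ¬ ram_mb ≤ 2048 by omega]
  by_cases c2 : vcpus ≤ 2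
  · simp only [c1, c2, if_true, if_false]
    rw [show (PySem.Dict.get? pvTable 2).getD [] =
        [(4096, "m1.small"), (8192, "m1.medium"), (16384, "m1.large")] by decide]
    rcases le_or_gt ram_mb 4096 with h1 | h1
    · simp [PySem.List.bisectLeft, PySem.List.bisectLeftLoop, List.find?, h1,
        show ¬(4096:Int) < ram_mb by omega, show ¬(8192:Int) < ram_mb by omega,
        show ¬(16384:Int) < ram_mb by omega]
    rcases le_or_gt ram_mb 8192 with h2 | h2
    · simp [PySem.List.bisectLeft, PySem.List.bisectLeftLoop, List.find?, h2,
        show (4096:Int) < ram_mb by omega, show ¬(8192:Int) < ram_mb by omega,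
        show ¬(16384:Int) < ram_mb by omega, show ¬ ram_mb ≤ 4096 by omega]
    rcases le_or_gt ram_mb 16384 with h3 | h3
    · simp [PySem.List.bisectLeft, PySem.List.bisectLeftLoop, List.find?, h3,
        show (4096:Int) < ram_mb by omega, show (8192:Int) < ram_mb by omega,
        show ¬(16384:Int) < ram_mb by omega, show ¬ ram_mb ≤ 4096 by omega,
        show ¬ ram_mb ≤ 8192 by omega]
    · simp [PySem.List.bisectLeft, PySem.List.bisectLeftLoop, List.find?, PySem.List.pyGet?,
        PySem.List.pyIdx?, show (4096:Int) < ram_mb by omega, show (8192:Int) < ram_mb by omega,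
        show (16384:Int) < ram_mb by omega, show ¬ ram_mb ≤ 4096 by omega,
        show ¬ ram_mb ≤ 8192 by omega, show ¬ ram_mb ≤ 16384 by omega]
  by_cases c4 : vcpus ≤ 4
  · simp only [c1, c2, c4, if_true, if_false]
    rw [show (PySem.Dict.get? pvTable 4).getD [] =
        [(8192, "m1.medium"), (16384, "m1.large"), (32768, "m1.xlarge")] by decide]
    rcases le_or_gt ram_mb 8192 with h1 | h1
    · simp [PySem.List.bisectLeft, PySem.List.bisectLeftLoop, List.find?, h1,
        show ¬(8192:Int) < ram_mb by omega, show ¬(16384:Int) < ram_mb by omega,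
        show ¬(32768:Int) < ram_mb by omega]
    rcases le_or_gt ram_mb 16384 with h2 | h2
    · simp [PySem.List.bisectLeft, PySem.List.bisectLeftLoop, List.find?, h2,
        show (8192:Int) < ram_mb by omega, show ¬(16384:Int) < ram_mb by omega,
        show ¬(32768:Int) < ram_mb by omega, show ¬ ram_mb ≤ 8192 by omega]
    rcases le_or_gt ram_mb 32768 with h3 | h3
    · simp [PySem.List.bisectLeft, PySem.List.bisectLeftLoop, List.find?, h3,
        show (8192:Int) < ram_mb by omega, show (16384:Int) < ram_mb by omega,
        show ¬(32768:Int) < ram_mb by omega, show ¬ ram_mb ≤ 8192 by omega,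
        show ¬ ram_mb ≤ 16384 by omega]
    · simp [PySem.List.bisectLeft, PySem.List.bisectLeftLoop, List.find?, PySem.List.pyGet?,
        PySem.List.pyIdx?, show (8192:Int) < ram_mb by omega, show (16384:Int) < ram_mb by omega,
        show (32768:Int) < ram_mb by omega, show ¬ ram_mb ≤ 8192 by omega,
        show ¬ ram_mb ≤ 16384 by omega, show ¬ ram_mb ≤ 32768 by omega]
  by_cases c8 : vcpus ≤ 8
  · simp only [c1, c2, c4, c8, if_true, if_false]
    rw [show (PySem.Dict.get? pvTable 8).getD [] =
        [(16384, "m1.large"), (32768, "m1.xlarge"), (65536, "m1.2xlarge")] by decide]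
    rcases le_or_gt ram_mb 16384 with h1 | h1
    · simp [PySem.List.bisectLeft, PySem.List.bisectLeftLoop, List.find?, h1,
        show ¬(16384:Int) < ram_mb by omega, show ¬(32768:Int) < ram_mb by omega,
        show ¬(65536:Int) < ram_mb by omega]
    rcases le_or_gt ram_mb 32768 with h2 | h2
    · simp [PySem.List.bisectLeft, PySem.List.bisectLeftLoop, List.find?, h2,
        show (16384:Int) < ram_mb by omega, show ¬(32768:Int) < ram_mb by omega,
        show ¬(65536:Int) < ram_mb by omega, show ¬ ram_mb ≤ 16384 by omega]
    rcases le_or_gt ram_mb 65536 with h3 | h3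
    · simp [PySem.List.bisectLeft, PySem.List.bisectLeftLoop, List.find?, h3,
        show (16384:Int) < ram_mb by omega, show (32768:Int) < ram_mb by omega,
        show ¬(65536:Int) < ram_mb by omega, show ¬ ram_mb ≤ 16384 by omega,
        show ¬ ram_mb ≤ 32768 by omega]
    · simp [PySem.List.bisectLeft, PySem.List.bisectLeftLoop, List.find?, PySem.List.pyGet?,
        PySem.List.pyIdx?, show (16384:Int) < ram_mb by omega, show (32768:Int) < ram_mb by omega,
        show (65536:Int) < ram_mb by omega, show ¬ ram_mb ≤ 16384 by omega,
        show ¬ ram_mb ≤ 32768 by omega, show ¬ ram_mb ≤ 65536 by omega]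
  · simp only [c1, c2, c4, c8, if_false]
    rw [show (PySem.Dict.get? pvTable 16).getD [] =
        [(32768, "m1.xlarge"), (65536, "m1.2xlarge"), (131072, "m1.4xlarge")] by decide]
    rcases le_or_gt ram_mb 32768 with h1 | h1
    · simp [PySem.List.bisectLeft, PySem.List.bisectLeftLoop, List.find?, h1,
        show ¬(32768:Int) < ram_mb by omega, show ¬(65536:Int) < ram_mb by omega,
        show ¬(131072:Int) < ram_mb by omega]
    rcases le_or_gt ram_mb 65536 with h2 | h2
    · simp [PySem.List.bisectLeft, PySem.List.bisectLeftLoop, List.find?, h2,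
        show (32768:Int) < ram_mb by omega, show ¬(65536:Int) < ram_mb by omega,
        show ¬(131072:Int) < ram_mb by omega, show ¬ ram_mb ≤ 32768 by omega]
    rcases le_or_gt ram_mb 131072 with h3 | h3
    · simp [PySem.List.bisectLeft, PySem.List.bisectLeftLoop, List.find?, h3,
        show (32768:Int) < ram_mb by omega, show (65536:Int) < ram_mb by omega,
        show ¬(131072:Int) < ram_mb by omega, show ¬ ram_mb ≤ 32768 by omega,
        show ¬ ram_mb ≤ 65536 by omega]
    · simp [PySem.List.bisectLeft, PySem.List.bisectLeftLoop, List.find?, PySem.List.pyGet?,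
        PySem.List.pyIdx?, show (32768:Int) < ram_mb by omega, show (65536:Int) < ram_mb by omega,
        show (131072:Int) < ram_mb by omega, show ¬ ram_mb ≤ 32768 by omega,
        show ¬ ram_mb ≤ 65536 by omega, show ¬ ram_mb ≤ 131072 by omega]
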